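-- pv_equiv track=rewrite | github.com/JamesKohlsRepo/PythonPoker | gameLogic.py | checkForPairs
-- ===== SOURCE A (Python) =====
-- def checkForPairs(hand):
--     """
--     Helper function for CheckForRank, returns all pairs
--
--     Parameters:
--     hand (List of Dicts): 2 hand cards + 5 community cards
--
--     Returns:
--     valid_pairs (list of list): cards comprising the hand
--     reconstructed_list (list): cards not used in pairs, used for creating the kicker list
--     """
--     valid_pairs = []
--     ranks = {2: [], 3: [], 4: [], 5: [], 6: [], 7: [], 8: [], 9: [], 10: [], 11: [], 12: [], 13: [], 14: []}
--     for card in hand: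
--         ranks[card['value']].append(card)
--
--     for rank in reversed(list(ranks.items())):
--         i  = len(rank[1])
--         if i >= 2:
--             valid_pairs.append(rank[1])
--             ranks[rank[0]] = []
--             #return i
--     reconstructed_list = []
--     for rank in ranks.keys():
--         reconstructed_list.extend(ranks[rank])
--
--     return valid_pairs, reconstructed_list
-- ===== SOURCE B (Python) =====
-- def checkForPairs(hand):
--     valid_pairs = []
--     reconstructed_list = []
--     for v in range(14, 1, -1):
--         group = [card for card in hand if card['value'] == v]
--         if len(group) >= 2:
--             valid_pairs.append(group)
--         else:
--             reconstructed_list = group + reconstructed_list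
--     return valid_pairs, reconstructed_list
-- ===== Notes on version B (the rewrite author's own statement) =====
-- stated objective: alternative
-- what changed: Replaced the 13-bucket dict accumulation plus a reversed-items pass and a final keys pass with a single descending loop over the ranks 14..2 that filters the hand per rank, appending groups of >=2 as pairs and prepending singles to keep the leftover list ascending.
-- outside the precondition, e.g. on checkForPairs([{'value': 20}]): A raises KeyError, B returns ([], [])
import Mathlib
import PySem

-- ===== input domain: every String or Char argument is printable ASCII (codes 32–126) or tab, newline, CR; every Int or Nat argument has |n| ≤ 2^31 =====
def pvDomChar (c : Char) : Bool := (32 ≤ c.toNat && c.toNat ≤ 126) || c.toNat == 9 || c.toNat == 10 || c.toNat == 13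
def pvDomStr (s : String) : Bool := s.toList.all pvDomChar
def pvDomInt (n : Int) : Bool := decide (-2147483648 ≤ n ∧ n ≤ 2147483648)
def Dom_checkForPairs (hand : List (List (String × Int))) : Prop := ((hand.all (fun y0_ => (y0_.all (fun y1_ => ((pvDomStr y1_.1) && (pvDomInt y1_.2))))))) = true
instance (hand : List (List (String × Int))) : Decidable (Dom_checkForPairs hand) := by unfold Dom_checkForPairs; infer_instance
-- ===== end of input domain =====

-- B replaces A's 13-bucket dict accumulation (plus a reversed-items pass and a keys pass)
-- by one descending loop over the ranks 14..2 that filters the hand per rank ('alternative' objective).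

-- card['value'] for a card given as an association list (Python dict: a later duplicate key wins).
def pvVal (card : List (String × Int)) : Int := ((PySem.Dict.ofList card).get? "value").getD 0

-- ranks = {2: [], 3: [], …, 14: []}
def pvRanks0 : PySem.Dict Int (List (List (String × Int))) :=
  PySem.Dict.ofList [(2, []), (3, []), (4, []), (5, []), (6, []), (7, []), (8, []), (9, []), (10, []), (11, []), (12, []), (13, []), (14, [])]

-- ===== PORT A =====
def checkForPairs (hand : List (List (String × Int))) : (List (List (List (String × Int)))) × (List (List (String × Int))) :=
  -- for card in hand: ranks[card['value']].append(card)   (KeyError outside Pre_; modify is exact inside Pre_)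
  let ranks1 := hand.foldl (fun d card => d.modify (pvVal card) [] (· ++ [card])) pvRanks0
  -- for rank in reversed(list(ranks.items())): if len(rank[1]) >= 2: append; ranks[rank[0]] = []
  let st := (ranks1.items.reverse).foldl
    (fun (st : (List (List (List (String × Int)))) × PySem.Dict Int (List (List (String × Int)))) rank =>
      if 2 ≤ rank.2.length then (st.1 ++ [rank.2], st.2.insert rank.1 []) else st)
    ([], ranks1)
  -- for rank in ranks.keys(): reconstructed_list.extend(ranks[rank])
  let reconstructed := (st.2.keys).foldl (fun acc k => acc ++ st.2.getD k []) []
  (st.1, reconstructed)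

-- ===== PORT B =====
def checkForPairs_alt (hand : List (List (String × Int))) : (List (List (List (String × Int)))) × (List (List (String × Int))) :=
  let st := (PySem.List.pyRange 14 1 (-1)).foldl
    (fun (st : (List (List (List (String × Int)))) × (List (List (String × Int)))) v =>
      let group := hand.filter (fun card => pvVal card == v)
      if 2 ≤ group.length then (st.1 ++ [group], st.2) else (st.1, group ++ st.2))
    ([], [])
  st

-- ===== PRECONDITION & SPEC =====
-- Pre_ excludes exactly the hands on which Python A raises KeyError: a card whose 'value' is
-- missing or lies outside 2..14 (the fixed bucket keys).
def Pre_checkForPairs (hand : List (List (String × Int))) : Prop :=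
  ∀ card ∈ hand, 2 ≤ pvVal card ∧ pvVal card ≤ 14 ∧ ((PySem.Dict.ofList card).get? "value").isSome = true
instance (hand : List (List (String × Int))) : Decidable (Pre_checkForPairs hand) := by unfold Pre_checkForPairs; infer_instance

def pvWitness_checkForPairs : (List (List (String × Int))) :=
  [[("value", 5), ("suit", 1)], [("value", 5), ("suit", 2)], [("value", 9), ("suit", 0)]]

def Spec_checkForPairs (hand : List (List (String × Int))) (out : (List (List (List (String × Int)))) × (List (List (String × Int)))) : Prop := out = checkForPairs_alt hand
instance (hand : List (List (String × Int))) (out : (List (List (List (String × Int)))) × (List (List (String × Int)))) : Decidable (Spec_checkForPairs hand out) := by unfold Spec_checkForPairs; infer_instance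

-- ===== CLAIM (what is proved, stated in full; the proofs are below) =====
def Claim_equal_checkForPairs : Prop := ∀ (hand : List (List (String × Int))), Dom_checkForPairs hand → Pre_checkForPairs hand → Spec_checkForPairs hand (checkForPairs hand)

-- ===== LEMMAS AND PROOFS =====

-- the buckets' key list and the per-rank bucket (what both programs group by)
def keysL : List Int := [2,3,4,5,6,7,8,9,10,11,12,13,14]
def bucketF (hand : List (List (String × Int))) (k : Int) : List (List (String × Int)) :=
  hand.filter (fun c => pvVal c == k)

theorem set_update_id {α : Type} [BEq α] [LawfulBEq α] (xs : List α) (s : PySem.Set α)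
    (h : ∀ x ∈ xs, x ∈ s) : PySem.Set.update s xs = s := by
  induction xs generalizing s with
  | nil => rfl
  | cons x xs ih =>
    have hx : PySem.Set.add s x = s := by
      simp [PySem.Set.add, PySem.Set.contains, h x (by simp)]
    have hu : PySem.Set.update s (x :: xs) = PySem.Set.update (PySem.Set.add s x) xs := by
      simp [PySem.Set.update, List.foldl_cons]
    rw [hu, hx]
    exact ih s (fun y hy => h y (by simp [hy]))

theorem ranks1_getD (hand : List (List (String × Int))) (k : Int) :
    (hand.foldl (fun d card => d.modify (pvVal card) [] (· ++ [card])) pvRanks0).getD k []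
    = pvRanks0.getD k [] ++ bucketF hand k := by
  rw [show (hand.foldl (fun d card => d.modify (pvVal card) [] (· ++ [card])) pvRanks0)
      = ((hand.map (fun c => (pvVal c, c))).foldl (fun d p => d.modify p.1 [] (· ++ [p.2])) pvRanks0) by
    rw [List.foldl_map]]
  rw [PySem.Dict.getD_foldl_modify_append]
  congr 1
  rw [List.filter_map, List.map_map]
  simp [bucketF, Function.comp_def]

theorem ranks0_getD_mem (k : Int) (hk : k ∈ keysL) : pvRanks0.getD k [] = [] := by
  fin_cases hk <;> decide

theorem ranks0_keys : pvRanks0.keys = keysL := by decide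

theorem ranks1_keys (hand : List (List (String × Int))) (hp : Pre_checkForPairs hand) :
    (hand.foldl (fun d card => d.modify (pvVal card) [] (· ++ [card])) pvRanks0).keys = keysL := by
  rw [PySem.Dict.keys_foldl_modify_key (key := pvVal)]
  rw [ranks0_keys]
  apply set_update_id
  intro x hx
  simp only [List.mem_map] at hx
  obtain ⟨c, hc, rfl⟩ := hx
  have := hp c hc
  simp [keysL]
  omega

theorem ranks1_items (hand : List (List (String × Int))) (hp : Pre_checkForPairs hand) :
    (hand.foldl (fun d card => d.modify (pvVal card) [] (· ++ [card])) pvRanks0).items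
    = keysL.map (fun k => (k, bucketF hand k)) := by
  have hnd : (hand.foldl (fun d card => d.modify (pvVal card) [] (· ++ [card])) pvRanks0).keys.Nodup := by
    exact PySem.Dict.nodup_keys_foldl_modify_key hand pvVal [] _ pvRanks0 (by rw [ranks0_keys]; decide)
  rw [PySem.Dict.items_eq_map_keys _ hnd []]
  rw [ranks1_keys hand hp]
  apply List.map_congr_left
  intro k hk
  rw [ranks1_getD, ranks0_getD_mem k hk]
  simp

-- the conditional-insert loop of A's second pass: lookup
theorem getD_foldl_condInsert (l : List (Int × List (List (String × Int))))
    (d : PySem.Dict Int (List (List (String × Int)))) (j : Int) :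
    (l.foldl (fun d r => if 2 ≤ r.2.length then d.insert r.1 [] else d) d).getD j []
    = if l.any (fun r => r.1 == j && decide (2 ≤ r.2.length)) then [] else d.getD j [] := by
  induction l generalizing d with
  | nil => simp
  | cons r l ih =>
    simp only [List.foldl_cons, List.any_cons]
    by_cases hc : 2 ≤ r.2.length
    · rw [if_pos hc, ih]
      by_cases hj : r.1 = j
      · simp [hj, hc]
      · have hb : (r.1 == j) = false := by simp [hj]
        simp only [hb, Bool.false_and, Bool.false_or]
        simp [PySem.Dict.getD_insert, Ne.symm hj]
    · rw [if_neg hc, ih]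
      have hd : decide (2 ≤ r.2.length) = false := by simp [hc]
      simp only [hd, Bool.and_false, Bool.false_or]

-- the conditional-insert loop of A's second pass: keys are unchanged
theorem keys_foldl_condInsert (l : List (Int × List (List (String × Int))))
    (d : PySem.Dict Int (List (List (String × Int)))) (h : ∀ r ∈ l, r.1 ∈ d.keys) :
    (l.foldl (fun d r => if 2 ≤ r.2.length then d.insert r.1 [] else d) d).keys = d.keys := by
  induction l generalizing d with
  | nil => rfl
  | cons r l ih =>
    simp only [List.foldl_cons]
    by_cases hc : 2 ≤ r.2.length
    · rw [if_pos hc]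
      have hcont : d.contains r.1 = true := by
        rw [PySem.Dict.contains_iff_mem_keys]; exact h r (by simp)
      have hkeys : (d.insert r.1 ([] : List (List (String × Int)))).keys = d.keys :=
        PySem.Dict.keys_insert_of_contains d _ hcont
      rw [ih _ (fun r' hr' => by rw [hkeys]; exact h r' (by simp [hr'])), hkeys]
    · rw [if_neg hc]
      exact ih _ (fun r' hr' => h r' (by simp [hr']))

-- A's pair-state fold is two independent folds
theorem splitA (l : List (Int × List (List (String × Int))))
    (init : (List (List (List (String × Int)))) × PySem.Dict Int (List (List (String × Int)))) :
    l.foldl (fun st rank => if 2 ≤ rank.2.length then (st.1 ++ [rank.2], st.2.insert rank.1 []) else st) init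
    = (l.foldl (fun a r => if 2 ≤ r.2.length then a ++ [r.2] else a) init.1,
       l.foldl (fun d r => if 2 ≤ r.2.length then d.insert r.1 [] else d) init.2) := by
  induction l generalizing init with
  | nil => rfl
  | cons r l ih =>
    simp only [List.foldl_cons]
    rw [ih]
    by_cases hc : 2 ≤ r.2.length <;> simp [hc]

-- B's pair-state fold is two independent folds
theorem splitB (hand : List (List (String × Int))) (l : List Int)
    (init : (List (List (List (String × Int)))) × (List (List (String × Int)))) :
    l.foldl (fun st v =>
        let group := hand.filter (fun card => pvVal card == v)
        if 2 ≤ group.length then (st.1 ++ [group], st.2) else (st.1, group ++ st.2)) init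
    = (l.foldl (fun a v => if 2 ≤ (bucketF hand v).length then a ++ [bucketF hand v] else a) init.1,
       l.foldl (fun r v => (if 2 ≤ (bucketF hand v).length then [] else bucketF hand v) ++ r) init.2) := by
  induction l generalizing init with
  | nil => rfl
  | cons v l ih =>
    simp only [List.foldl_cons]
    rw [ih]
    by_cases hc : 2 ≤ (bucketF hand v).length <;> simp only [bucketF] at hc ⊢ <;> simp [hc]

-- prepending along a list is flatMap along its reverse
theorem foldl_prepend {α β : Type} (q : β → List α) (L : List β) (acc : List α) :
    L.foldl (fun r v => q v ++ r) acc = (L.reverse).flatMap q ++ acc := by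
  induction L generalizing acc with
  | nil => simp
  | cons v L ih => simp [List.foldl_cons, ih]

theorem checkForPairs_eq (hand : List (List (String × Int))) (hp : Pre_checkForPairs hand) :
    checkForPairs hand = checkForPairs_alt hand := by
  unfold checkForPairs checkForPairs_alt
  dsimp only
  have hrange : PySem.List.pyRange 14 1 (-1) = keysL.reverse := by decide
  have hitems : (hand.foldl (fun d card => d.modify (pvVal card) [] (· ++ [card])) pvRanks0).items
      = keysL.map (fun k => (k, bucketF hand k)) := ranks1_items hand hp
  have hk1 : (hand.foldl (fun d card => d.modify (pvVal card) [] (· ++ [card])) pvRanks0).keys = keysL :=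
    ranks1_keys hand hp
  have hg1 : ∀ k ∈ keysL, (hand.foldl (fun d card => d.modify (pvVal card) [] (· ++ [card])) pvRanks0).getD k [] = bucketF hand k := by
    intro k hk; rw [ranks1_getD, ranks0_getD_mem k hk]; simp
  rw [hitems, hrange]
  rw [splitA, splitB hand]
  have hrev : (keysL.map (fun k => (k, bucketF hand k))).reverse
      = keysL.reverse.map (fun k => (k, bucketF hand k)) := by
    rw [List.map_reverse]
  rw [hrev]
  set D1 := hand.foldl (fun d card => d.modify (pvVal card) [] (· ++ [card])) pvRanks0 with hD1
  set D2 := (keysL.reverse.map (fun k => (k, bucketF hand k))).foldl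
      (fun d r => if 2 ≤ r.2.length then d.insert r.1 [] else d) D1 with hD2
  have hkeys2 : D2.keys = keysL := by
    rw [hD2, keys_foldl_condInsert _ _ ?_, hk1]
    intro r hr
    rw [hk1]
    simp only [List.mem_map, List.mem_reverse] at hr
    obtain ⟨k, hk, rfl⟩ := hr
    exact hk
  have hgetD2 : ∀ k ∈ keysL, D2.getD k []
      = if 2 ≤ (bucketF hand k).length then [] else bucketF hand k := by
    intro k hk
    rw [hD2, getD_foldl_condInsert]
    rw [List.any_map, List.any_reverse]
    by_cases hck : 2 ≤ (bucketF hand k).length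
    · rw [if_pos, if_pos hck]
      exact List.any_eq_true.mpr ⟨k, hk, by simp [hck]⟩
    · rw [if_neg, if_neg hck, hg1 k hk]
      rw [List.any_eq_true]
      rintro ⟨k', hk', hkk'⟩
      simp only [Function.comp] at hkk'
      by_cases he : k' = k
      · subst he; simp [hck] at hkk'
      · simp [he] at hkk'
  rw [List.foldl_map]
  dsimp only
  congr 1
  rw [hkeys2]
  rw [PySem.List.foldl_append_eq_flatMap (g := fun k => D2.getD k [])]
  rw [foldl_prepend (q := fun v => if 2 ≤ (bucketF hand v).length then [] else bucketF hand v)]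
  rw [List.reverse_reverse]
  simp only [List.nil_append, List.append_nil]
  rw [List.flatMap_def, List.flatMap_def, List.map_congr_left hgetD2]

-- ===== VERDICT (by name: the statement is the Claim_ definition above) =====
theorem checkForPairs_spec : Claim_equal_checkForPairs := by
  intro hand _ hp
  unfold Spec_checkForPairs
  exact checkForPairs_eq hand hp
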